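-- pv_equiv track=rewrite | github.com/DamianWnorowski/consciousness-nexus | ULTRA_MASTER_ORCHESTRATOR.py | _create_parallel_groups
-- ===== SOURCE A (Python) =====
-- from typing import Dict, Any, List, Optional
--
-- def _create_parallel_groups(dependencies: Dict[str, List[str]]) -> List[List[str]]:
--     """Create parallel execution groups based on dependencies"""
--
--     # Simple grouping: independent systems can run in parallel
--     groups = []
--     processed = set()
--
--     for system, deps in dependencies.items():
--         if not deps and system not in processed:
--             # Independent system - can run in parallel with others
--             group = [s for s, d in dependencies.items()
--                     if not d and s not in processed]
--             if group:
--                 groups.append(group)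
--                 processed.update(group)
--         elif system not in processed:
--             # Dependent system - separate group
--             groups.append([system])
--             processed.add(system)
--
--     return groups
-- ===== SOURCE B (Python) =====
-- def _create_parallel_groups(dependencies):
--     """Create parallel execution groups based on dependencies"""
--     items = list(dependencies.items())
--     # position of the first independent system (empty dependency list), if any
--     cut = next((i for i, (_, d) in enumerate(items) if not d), None)
--     if cut is None:
--         # no independent system: every system forms its own group
--         return [[s] for s, _ in items]
--     independents = [s for s, d in items if not d]
--     # everything before the cut is dependent; the combined independent group
--     # goes at the cut; after it, only dependent systems form singleton groups
--     return ([[s] for s, _ in items[:cut]]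
--             + [independents]
--             + [[s] for s, d in items[cut + 1:] if d])
-- ===== Notes on version B (the rewrite author's own statement) =====
-- stated objective: simpler
-- what changed: B is staged instead of a stateful loop: it locates the index of the first independent system, then builds the result as a concatenation of singleton groups before the cut, the precomputed independent group at the cut, and singletons of the dependent systems after the cut; no processed set, no flag, no per-iteration rescan of the dict.
import Mathlib
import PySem

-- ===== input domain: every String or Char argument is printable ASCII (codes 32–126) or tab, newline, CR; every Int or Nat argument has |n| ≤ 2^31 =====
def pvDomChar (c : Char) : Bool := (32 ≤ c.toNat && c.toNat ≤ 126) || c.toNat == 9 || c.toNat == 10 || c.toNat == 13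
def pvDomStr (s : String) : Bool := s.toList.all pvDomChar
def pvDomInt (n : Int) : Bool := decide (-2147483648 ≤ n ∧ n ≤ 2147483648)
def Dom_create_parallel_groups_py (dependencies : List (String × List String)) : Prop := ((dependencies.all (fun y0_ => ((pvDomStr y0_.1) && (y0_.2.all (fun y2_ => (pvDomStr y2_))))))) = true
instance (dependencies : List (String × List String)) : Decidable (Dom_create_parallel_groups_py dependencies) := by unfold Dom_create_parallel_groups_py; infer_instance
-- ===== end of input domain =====

-- B replaces A's stateful loop (processed set + per-iteration rescan) by a staged construction:
-- find the first independent key, then concatenate singleton groups before the cut, the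
-- precomputed independent group, and singletons of the dependents after the cut;
-- equal output on assoc lists with distinct keys (a Python dict never has duplicates).


-- ===== PORT A =====
-- one loop iteration of A: branch order and state (groups, processed set) exactly as in the Python
def pvStepA (dep : List (String × List String))
    (st : List (List String) × PySem.Set String) (sd : String × List String) :
    List (List String) × PySem.Set String :=
  if sd.2 = [] ∧ sd.1 ∉ st.2 then
    let group := (dep.filter (fun p => decide (p.2 = [] ∧ p.1 ∉ st.2))).map Prod.fst
    if group ≠ [] then (st.1 ++ [group], PySem.Set.update st.2 group) else st
  else if sd.1 ∉ st.2 then (st.1 ++ [[sd.1]], PySem.Set.add st.2 sd.1)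
  else st

def create_parallel_groups_py (dependencies : List (String × List String)) : List (List String) :=
  (dependencies.foldl (pvStepA dependencies) ([], PySem.Set.empty)).1

-- ===== PORT B =====
-- B's precomputed list of independent systems (keys with empty dependency list, in dict order)
def pvIndep (dep : List (String × List String)) : List String :=
  (dep.filter (fun p => decide (p.2 = []))).map Prod.fst

-- staged construction: find the cut (first independent key); singletons before it,
-- the independent group at it, singletons of the dependents after it
def create_parallel_groups_py_alt (dependencies : List (String × List String)) : List (List String) :=
  match dependencies.findIdx? (fun p => decide (p.2 = [])) with
  | none => dependencies.map (fun p => [p.1])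
  | some cut =>
      (dependencies.take cut).map (fun p => [p.1])
        ++ [pvIndep dependencies]
        ++ ((dependencies.drop (cut + 1)).filter (fun p => decide (p.2 ≠ []))).map (fun p => [p.1])

-- ===== PRECONDITION & SPEC =====
-- Pre_ excludes association lists with duplicate keys: those do not represent a Python dict
-- (a dict cannot contain a duplicate key), so the Python A is never called on them.
def Pre_create_parallel_groups_py (dependencies : List (String × List String)) : Prop :=
  (dependencies.map Prod.fst).Nodup
instance (dependencies : List (String × List String)) : Decidable (Pre_create_parallel_groups_py dependencies) := by unfold Pre_create_parallel_groups_py; infer_instance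

def pvWitness_create_parallel_groups_py : (List (String × List String)) :=
  [("a", []), ("b", ["a"]), ("c", [])]

def Spec_create_parallel_groups_py (dependencies : List (String × List String)) (out : List (List String)) : Prop := out = create_parallel_groups_py_alt dependencies
instance (dependencies : List (String × List String)) (out : List (List String)) : Decidable (Spec_create_parallel_groups_py dependencies out) := by unfold Spec_create_parallel_groups_py; infer_instance

-- ===== CLAIM (what is proved, stated in full; the proofs are below) =====
def Claim_equal_create_parallel_groups_py : Prop := ∀ (dependencies : List (String × List String)), Dom_create_parallel_groups_py dependencies → Pre_create_parallel_groups_py dependencies → Spec_create_parallel_groups_py dependencies (create_parallel_groups_py dependencies)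

-- ===== LEMMAS AND PROOFS =====

-- proof-side bridge: a single fold with a boolean flag sits between A's set-fold and B's
-- staged construction; pv_fold_eq equates A's fold with it, pv_foldB_false equates it with B.
def pvStepB (ind : List String)
    (st : List (List String) × Bool) (sd : String × List String) :
    List (List String) × Bool :=
  if sd.2 ≠ [] then (st.1 ++ [[sd.1]], st.2)
  else if st.2 = false then (st.1 ++ [ind], true)
  else st

-- the result B computes for a (suffix of the) list, parametrized by the emitted group
def pvAltBody (ind : List String) (l : List (String × List String)) : List (List String) :=
  match l.findIdx? (fun p => decide (p.2 = [])) with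
  | none => l.map (fun p => [p.1])
  | some cut =>
      (l.take cut).map (fun p => [p.1])
        ++ [ind]
        ++ ((l.drop (cut + 1)).filter (fun p => decide (p.2 ≠ []))).map (fun p => [p.1])

-- with distinct keys, two entries sharing a key are the same entry
lemma pv_key_inj {dep : List (String × List String)} (hnd : (dep.map Prod.fst).Nodup)
    {p q : String × List String} (hp : p ∈ dep) (hq : q ∈ dep) (h : p.1 = q.1) : p = q :=
  List.inj_on_of_nodup_map hnd hp hq h

-- the flag-fold after the group was emitted: remaining dependents become singleton groups
lemma pv_foldB_true (ind : List String) :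
    ∀ (l : List (String × List String)) (gs : List (List String)),
    (l.foldl (pvStepB ind) (gs, true)).1
      = gs ++ (l.filter (fun p => decide (p.2 ≠ []))).map (fun p => [p.1]) := by
  intro l
  induction l with
  | nil => intro gs; simp
  | cons sd rest ih =>
    intro gs
    by_cases hd : sd.2 = []
    · have hstep : pvStepB ind (gs, true) sd = (gs, true) := by simp [pvStepB, hd]
      simp only [List.foldl_cons, hstep, ih, List.filter_cons]
      simp [hd]
    · have hstep : pvStepB ind (gs, true) sd = (gs ++ [[sd.1]], true) := by simp [pvStepB, hd]
      simp only [List.foldl_cons, hstep, ih, List.filter_cons]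
      simp [hd]

-- the flag-fold from a lowered flag computes exactly B's staged construction
lemma pv_foldB_false (ind : List String) :
    ∀ (l : List (String × List String)) (gs : List (List String)),
    (l.foldl (pvStepB ind) (gs, false)).1 = gs ++ pvAltBody ind l := by
  intro l
  induction l with
  | nil => intro gs; simp [pvAltBody]
  | cons sd rest ih =>
    intro gs
    by_cases hd : sd.2 = []
    · have hstep : pvStepB ind (gs, false) sd = (gs ++ [ind], true) := by simp [pvStepB, hd]
      simp only [List.foldl_cons, hstep, pv_foldB_true]
      unfold pvAltBody
      rw [List.findIdx?_cons]
      simp [hd]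
    · have hstep : pvStepB ind (gs, false) sd = (gs ++ [[sd.1]], false) := by simp [pvStepB, hd]
      simp only [List.foldl_cons, hstep, ih]
      unfold pvAltBody
      rw [List.findIdx?_cons]
      rw [if_neg (by simp [hd])]
      cases hfi : rest.findIdx? (fun p => decide (p.2 = [])) with
      | none => simp
      | some cut => simp [List.take_succ_cons, List.drop_succ_cons]

-- the loop invariant: after processing a prefix `pre`, A's processed set contains exactly the
-- dependent keys of `pre`, plus (once the flag is up, i.e. the combined group was emitted)
-- all independent keys of the whole dict; then A's fold tracks the flag-fold.
lemma pv_fold_eq (dep : List (String × List String)) (hnd : (dep.map Prod.fst).Nodup) :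
    ∀ (l pre : List (String × List String)), dep = pre ++ l →
    ∀ (gs : List (List String)) (P : PySem.Set String) (flag : Bool),
    (∀ x, x ∈ P ↔ (x ∈ (pre.filter (fun p => decide (p.2 ≠ []))).map Prod.fst ∨ (flag = true ∧ x ∈ pvIndep dep))) →
    (l.foldl (pvStepA dep) (gs, P)).1 = (l.foldl (pvStepB (pvIndep dep)) (gs, flag)).1 := by
  intro l
  induction l with
  | nil => intro pre hsplit gs P flag hinv; rfl
  | cons sd l ih =>
    intro pre hsplit gs P flag hinv
    have hsd : sd ∈ dep := by rw [hsplit]; exact List.mem_append_right _ (List.mem_cons_self ..)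
    -- sd.1 is not a key of pre
    have hnotpre : sd.1 ∉ pre.map Prod.fst := by
      intro hmem
      have : (dep.map Prod.fst).Nodup := hnd
      rw [hsplit, List.map_append] at this
      have hdisj := (List.nodup_append.mp this).2.2
      exact hdisj _ hmem sd.1 (by simp) rfl
    have hnotdep : sd.1 ∉ (pre.filter (fun p => decide (p.2 ≠ []))).map Prod.fst := by
      intro hmem
      exact hnotpre (by
        rcases List.mem_map.mp hmem with ⟨q, hq, hq1⟩
        exact List.mem_map.mpr ⟨q, List.mem_of_mem_filter hq, hq1⟩)
    by_cases hd : sd.2 = []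
    · -- sd is independent; it is in pvIndep dep
      have hin : sd.1 ∈ pvIndep dep := by
        exact List.mem_map.mpr ⟨sd, List.mem_filter.mpr ⟨hsd, by simp [hd]⟩, rfl⟩
      have hPmem : sd.1 ∈ P ↔ flag = true := by
        rw [hinv sd.1]
        constructor
        · rintro (h | ⟨hf, _⟩)
          · exact absurd h hnotdep
          · exact hf
        · intro hf
          exact Or.inr ⟨hf, hin⟩
      cases flag with
      | false =>
        have hnP : sd.1 ∉ P := by simp [hPmem]
        -- A's comprehension yields exactly all independents
        have hgroup : (dep.filter (fun p => decide (p.2 = [] ∧ p.1 ∉ P))).map Prod.fst = pvIndep dep := by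
          unfold pvIndep
          congr 1
          apply List.filter_congr
          intro p hp
          by_cases hp2 : p.2 = []
          · have hpnP : p.1 ∉ P := by
              intro hmem
              rcases (hinv p.1).mp hmem with h | ⟨hf, _⟩
              · rcases List.mem_map.mp h with ⟨q, hq, hq1⟩
                have hqdep : q ∈ dep := by rw [hsplit]; exact List.mem_append_left _ (List.mem_of_mem_filter hq)
                have : p = q := pv_key_inj hnd hp hqdep hq1.symm
                have hq2 : q.2 ≠ [] := by simpa using (List.of_mem_filter hq)
                rw [← this] at hq2; exact hq2 hp2
              · exact absurd hf (by simp)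
            simp [hp2, hpnP]
          · simp [hp2]
        have hne : pvIndep dep ≠ [] := by
          intro h; rw [h] at hin; exact absurd hin (List.not_mem_nil)
        have hstepA : pvStepA dep (gs, P) sd = (gs ++ [pvIndep dep], PySem.Set.update P (pvIndep dep)) := by
          simp only [pvStepA, hgroup]
          simp [hd, hnP, hne]
        have hstepB : pvStepB (pvIndep dep) (gs, false) sd = (gs ++ [pvIndep dep], true) := by
          simp [pvStepB, hd]
        simp only [List.foldl_cons, hstepA, hstepB]
        apply ih (pre ++ [sd]) (by rw [hsplit]; simp)
        intro x
        rw [PySem.Set.mem_update, hinv x]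
        have hfil : (pre ++ [sd]).filter (fun p => decide (p.2 ≠ [])) = pre.filter (fun p => decide (p.2 ≠ [])) := by
          simp [List.filter_append, hd]
        rw [hfil]
        constructor
        · rintro ((h | ⟨hf, _⟩) | h)
          · exact Or.inl h
          · exact absurd hf (by simp)
          · exact Or.inr ⟨rfl, h⟩
        · rintro (h | ⟨_, h⟩)
          · exact Or.inl (Or.inl h)
          · exact Or.inr h
      | true =>
        have hP : sd.1 ∈ P := hPmem.mpr rfl
        have hstepA : pvStepA dep (gs, P) sd = (gs, P) := by
          simp [pvStepA, hd, hP]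
        have hstepB : pvStepB (pvIndep dep) (gs, true) sd = (gs, true) := by
          simp [pvStepB, hd]
        simp only [List.foldl_cons, hstepA, hstepB]
        apply ih (pre ++ [sd]) (by rw [hsplit]; simp)
        intro x
        rw [hinv x]
        have hfil : (pre ++ [sd]).filter (fun p => decide (p.2 ≠ [])) = pre.filter (fun p => decide (p.2 ≠ [])) := by
          simp [List.filter_append, hd]
        rw [hfil]
    · -- sd is dependent
      have hnind : sd.1 ∉ pvIndep dep := by
        intro hmem
        rcases List.mem_map.mp hmem with ⟨q, hq, hq1⟩
        have hqdep : q ∈ dep := List.mem_of_mem_filter hq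
        have : sd = q := pv_key_inj hnd hsd hqdep hq1.symm
        have hq2 : q.2 = [] := by simpa using (List.of_mem_filter hq)
        rw [← this] at hq2; exact hd hq2
      have hnP : sd.1 ∉ P := by
        intro hmem
        rcases (hinv sd.1).mp hmem with h | ⟨_, h⟩
        · exact hnotdep h
        · exact hnind h
      have hstepA : pvStepA dep (gs, P) sd = (gs ++ [[sd.1]], PySem.Set.add P sd.1) := by
        simp [pvStepA, hd, hnP]
      have hstepB : pvStepB (pvIndep dep) (gs, flag) sd = (gs ++ [[sd.1]], flag) := by
        simp [pvStepB, hd]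
      simp only [List.foldl_cons, hstepA, hstepB]
      apply ih (pre ++ [sd]) (by rw [hsplit]; simp)
      intro x
      rw [PySem.Set.mem_add, hinv x]
      have hfil : ((pre ++ [sd]).filter (fun p => decide (p.2 ≠ []))).map Prod.fst
          = (pre.filter (fun p => decide (p.2 ≠ []))).map Prod.fst ++ [sd.1] := by
        simp [List.filter_append, hd]
      rw [hfil]
      constructor
      · rintro ((h | h) | h)
        · exact Or.inl (List.mem_append.mpr (Or.inl h))
        · exact Or.inr h
        · exact Or.inl (List.mem_append.mpr (Or.inr (by simp [h])))
      · rintro (h | h)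
        · rcases List.mem_append.mp h with h | h
          · exact Or.inl (Or.inl h)
          · exact Or.inr (by simpa using h)
        · exact Or.inl (Or.inr h)

-- B's port is the staged body at the full list
lemma pv_alt_eq_body (dep : List (String × List String)) :
    create_parallel_groups_py_alt dep = pvAltBody (pvIndep dep) dep := rfl

-- ===== VERDICT (by name: the statement is the Claim_ definition above) =====
theorem create_parallel_groups_py_spec : Claim_equal_create_parallel_groups_py := by
  intro dependencies _ hpre
  unfold Spec_create_parallel_groups_py create_parallel_groups_py
  have hB := pv_foldB_false (pvIndep dependencies) dependencies []
  rw [List.nil_append] at hB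
  rw [pv_alt_eq_body, ← hB]
  exact pv_fold_eq dependencies hpre dependencies [] rfl [] PySem.Set.empty false
    (by intro x; simp [PySem.Set.empty])
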